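-- pv_equiv track=rewrite | github.com/wplohrmann/projects | code_jam2022/1b/a.py | solve
-- ===== SOURCE A (Python) =====
-- from collections import deque
--
-- def solve(ps):
--     """
--     Remove any pancake that appears in between two numbers that are both greater
--     State only depends on maximum pancake so far
--     """
--     ps = deque(ps)
--     most = 0
--     count = 0
--     while len(ps) > 0:
--         if len(ps) == 1:
--             d = ps.pop()
--         elif ps[0] > ps[-1]:
--             d = ps.pop()
--         else:
--             d = ps.popleft()
--         if d >= most:
--             count += 1
--         most = max(d, most)
--
--     return count
-- ===== SOURCE B (Python) =====
-- def solve(ps):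
--     ps = list(ps)
--     lm = []
--     m = 0
--     for p in ps:
--         lm.append(m)
--         m = max(m, p)
--     rm = []
--     m = 0
--     for p in reversed(ps):
--         rm.append(m)
--         m = max(m, p)
--     rm.reverse()
--     return sum(1 for p, l, r in zip(ps, lm, rm) if p >= min(l, r))
-- ===== Notes on version B (the rewrite author's own statement) =====
-- stated objective: simpler
-- what changed: Replaced A's stateful two-ended deque elimination loop (pop the smaller end, track running max) by two prefix/suffix running-maximum passes plus one counting pass: count i with ps[i] >= min(leftMax[i], rightMax[i]), both maxima baselined at 0.
import Mathlib
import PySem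

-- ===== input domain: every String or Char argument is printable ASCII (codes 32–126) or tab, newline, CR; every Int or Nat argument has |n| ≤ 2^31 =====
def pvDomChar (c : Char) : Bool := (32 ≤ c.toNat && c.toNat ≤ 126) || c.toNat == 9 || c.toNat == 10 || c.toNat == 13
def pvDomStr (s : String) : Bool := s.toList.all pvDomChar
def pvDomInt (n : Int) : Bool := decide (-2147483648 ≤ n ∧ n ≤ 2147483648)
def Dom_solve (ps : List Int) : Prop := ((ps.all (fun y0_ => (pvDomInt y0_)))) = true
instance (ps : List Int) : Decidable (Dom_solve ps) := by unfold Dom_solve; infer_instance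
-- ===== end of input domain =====

-- B replaces A's two-ended deque elimination loop by two prefix/suffix running-maximum
-- passes and one counting pass (objective: simpler/alternative, same asymptotic cost).

-- ===== PORT A =====
-- A's while-loop over a deque: pop the smaller end, count elements ≥ running max.
-- One element leaves the deque per iteration, so the loop runs exactly ps.length
-- times; that length is used as a structural recursion bound (totality only).
def solveLoop : Nat → List Int → Int → Int → Int
  | _, [], _, count => count
  | 0, _, _, count => count
  | _ + 1, [d], most, count => if d ≥ most then count + 1 else count
  | n + 1, a :: b :: t, most, count =>
      let lastv := (b :: t).getLast (by simp)
      if a > lastv then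
        solveLoop n (a :: (b :: t).dropLast) (max lastv most)
          (if lastv ≥ most then count + 1 else count)
      else
        solveLoop n (b :: t) (max a most)
          (if a ≥ most then count + 1 else count)

def solve (ps : List Int) : Int := solveLoop ps.length ps 0 0

-- ===== PORT B =====
-- prefix maxima with baseline m: entry i is max(m, xs[0..i-1])
def prefMaxes (m : Int) : List Int → List Int
  | [] => []
  | x :: xs => m :: prefMaxes (max m x) xs

def solve_alt (ps : List Int) : Int :=
  let lm := prefMaxes 0 ps
  let rm := (prefMaxes 0 ps.reverse).reverse
  ((ps.zip (lm.zip rm)).map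
    (fun pr => if pr.1 ≥ min pr.2.1 pr.2.2 then (1 : Int) else 0)).sum

-- ===== PRECONDITION & SPEC =====
def Spec_solve (ps : List Int) (out : Int) : Prop := out = solve_alt ps
instance (ps : List Int) (out : Int) : Decidable (Spec_solve ps out) := by unfold Spec_solve; infer_instance

-- ===== CLAIM (what is proved, stated in full; the proofs are below) =====
def Claim_equal_solve : Prop := ∀ (ps : List Int), Dom_solve ps → Spec_solve ps (solve ps)

-- ===== LEMMAS AND PROOFS =====

-- proof-side reformulation of B's count: left baseline l, right baseline r
def C (l r : Int) : List Int → Int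
  | [] => 0
  | x :: xs => (if x ≥ min l (xs.foldr max r) then 1 else 0) + C (max l x) r xs

theorem le_foldr_max (xs : List Int) (r : Int) : r ≤ xs.foldr max r := by
  induction xs with
  | nil => simp
  | cons x xs ih => simp only [List.foldr]; omega

theorem mem_le_foldr_max (xs : List Int) (r a : Int) (h : a ∈ xs) : a ≤ xs.foldr max r := by
  induction xs with
  | nil => simp at h
  | cons x xs ih =>
      simp only [List.foldr]
      rcases List.mem_cons.mp h with h | h
      · omega
      · have := ih h; omega

theorem le_foldl_max (xs : List Int) (l : Int) : l ≤ xs.foldl max l := by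
  induction xs generalizing l with
  | nil => simp
  | cons x xs ih =>
      simp only [List.foldl]
      have := ih (max l x); omega

theorem foldl_reverse_max (xs : List Int) (r : Int) :
    xs.reverse.foldl max r = xs.foldr max r := by
  induction xs generalizing r with
  | nil => simp
  | cons x xs ih =>
      simp only [List.reverse_cons, List.foldl_append, List.foldl, List.foldr, ih]
      omega

theorem foldr_max_right (xs : List Int) (r a : Int) :
    xs.foldr max (max r a) = max (xs.foldr max r) a := by
  induction xs with
  | nil => simp
  | cons x xs ih => simp only [List.foldr, ih]; omega

theorem C_nil (l r : Int) : C l r [] = 0 := rfl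

theorem C_cons (l r x : Int) (xs : List Int) :
    C l r (x :: xs) = (if x ≥ min l (xs.foldr max r) then 1 else 0) + C (max l x) r xs := rfl

-- absorbing a into the right baseline when a is ≤ the left baseline and ≤ the last element
theorem C_right_absorb (ys : List Int) (hne : ys ≠ []) (l r a : Int)
    (hl : a ≤ l) (hlast : a ≤ ys.getLast hne) : C l r ys = C l (max r a) ys := by
  induction ys generalizing l with
  | nil => simp at hne
  | cons x xs ih =>
      cases xs with
      | nil =>
          simp only [List.getLast] at hlast
          rw [C_cons, C_cons]
          simp only [List.foldr, C_nil]
          split_ifs <;> omega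
      | cons y ys' =>
          have hlast' : a ≤ (y :: ys').getLast (by simp) := by
            rwa [List.getLast_cons (by simp)] at hlast
          conv_lhs => rw [C_cons]
          conv_rhs => rw [C_cons]
          rw [foldr_max_right]
          have hbound : a ≤ (y :: ys').foldr max r :=
            le_trans hlast' (mem_le_foldr_max _ _ _ (List.getLast_mem _))
          have e2 : max ((y :: ys').foldr max r) a = (y :: ys').foldr max r := by omega
          rw [e2, ih (by simp) (max l x) (by omega) hlast']

-- absorbing c into the left baseline at the head when c < head and c ≤ right baseline
theorem C_left_absorb (u : List Int) (l r a c : Int) (hca : c < a) (hcr : c ≤ r) :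
    C l r (a :: u) = C (max l c) r (a :: u) := by
  simp only [C]
  have e : max (max l c) a = max l a := by omega
  rw [e]
  have hS : r ≤ u.foldr max r := le_foldr_max u r
  congr 1
  split_ifs with h1 h2 h2 <;> omega

theorem C_snoc (u : List Int) (l r z : Int) :
    C l r (u ++ [z]) = C l (max r z) u
      + (if z ≥ min (u.foldl max l) r then 1 else 0) := by
  induction u generalizing l with
  | nil => simp [C]
  | cons x xs ih =>
      simp only [List.cons_append, C, List.foldl]
      rw [ih (max l x)]
      have e : (xs ++ [z]).foldr max r = xs.foldr max (max r z) := by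
        rw [List.foldr_append]
        simp only [List.foldr]
        congr 1
        omega
      rw [e]; omega

theorem loop_eq_C : ∀ (n : ℕ) (xs : List Int) (m c : Int), xs.length ≤ n →
    solveLoop n xs m c = c + C m m xs := by
  intro n
  induction n with
  | zero =>
      intro xs m c h
      have : xs = [] := by cases xs <;> simp_all
      subst this; simp [solveLoop, C]
  | succ n ih =>
      intro xs m c h
      match xs with
      | [] => simp [solveLoop, C]
      | [d] =>
          simp only [solveLoop, C, List.foldr, min_self]
          split_ifs <;> omega
      | a :: b :: t =>
          rw [solveLoop]
          have hysne : (b :: t : List Int) ≠ [] := by simp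
          have hlen : (b :: t : List Int).length ≤ n := by simp at h ⊢; omega
          by_cases hcmp : a > (b :: t).getLast hysne
          · rw [if_pos hcmp]
            have hlen2 : (a :: (b :: t).dropLast).length ≤ n := by simp at h ⊢; omega
            rw [ih _ _ _ hlen2]
            have hdecomp : a :: b :: t = (a :: (b :: t).dropLast) ++ [(b :: t).getLast hysne] := by
              simp only [List.cons_append]
              rw [List.dropLast_append_getLast]
            conv_rhs => rw [hdecomp]
            rw [C_snoc]
            have hfl : m ≤ (a :: (b :: t).dropLast).foldl max m := le_foldl_max _ _
            have e1 : min ((a :: (b :: t).dropLast).foldl max m) m = m := by omega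
            rw [e1]
            rw [C_left_absorb (b :: t).dropLast m (max m ((b :: t).getLast hysne)) a
              ((b :: t).getLast hysne) hcmp (by omega)]
            have e2 : max m ((b :: t).getLast hysne) = max ((b :: t).getLast hysne) m := by omega
            rw [e2]
            split_ifs <;> omega
          · rw [if_neg hcmp]
            rw [ih _ _ _ hlen]
            conv_rhs => rw [C_cons]
            have hS : m ≤ (b :: t).foldr max m := le_foldr_max _ m
            have e1 : min m ((b :: t).foldr max m) = m := by omega
            rw [e1]
            have hle : a ≤ (b :: t).getLast hysne := by omega
            rw [C_right_absorb (b :: t) hysne (max m a) m a (by omega) hle]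
            have e2 : max m a = max a m := by omega
            rw [e2]
            split_ifs <;> omega

theorem prefMaxes_snoc (u : List Int) (m z : Int) :
    prefMaxes m (u ++ [z]) = prefMaxes m u ++ [u.foldl max m] := by
  induction u generalizing m with
  | nil => simp [prefMaxes]
  | cons x xs ih => simp only [List.cons_append, prefMaxes, List.foldl, ih]

theorem alt_eq_C (ps : List Int) : ∀ (l r : Int),
    ((ps.zip ((prefMaxes l ps).zip ((prefMaxes r ps.reverse).reverse))).map
      (fun pr => if pr.1 ≥ min pr.2.1 pr.2.2 then (1 : Int) else 0)).sum = C l r ps := by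
  induction ps with
  | nil => intro l r; simp [C]
  | cons x xs ih =>
      intro l r
      have e1 : prefMaxes r (x :: xs).reverse
          = prefMaxes r xs.reverse ++ [xs.reverse.foldl max r] := by
        rw [List.reverse_cons, prefMaxes_snoc]
      rw [e1]
      simp only [prefMaxes, List.reverse_append, List.reverse_cons, List.reverse_nil,
        List.nil_append, List.cons_append, List.zip_cons_cons, List.map_cons, List.sum_cons]
      rw [foldl_reverse_max, ih (max l x) r]
      simp [C]

-- ===== VERDICT (by name: the statement is the Claim_ definition above) =====
theorem solve_spec : Claim_equal_solve := by
  intro ps _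
  show solve ps = solve_alt ps
  have h1 : solve ps = 0 + C 0 0 ps := loop_eq_C ps.length ps 0 0 le_rfl
  have h2 : solve_alt ps = C 0 0 ps := alt_eq_C ps 0 0
  omega
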